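-- pv_equiv track=rewrite | github.com/ctrl-alt-d/django-aula | aula/apps/extEsfera/sincronitzaEsfera.py | dades_responsable
-- ===== SOURCE A (Python) =====
-- def dades_responsable ( dades ):
--     splitted = dades.split(" - ")
--     mails = [ dada for dada in splitted if "@" in dada ]
--     fixes = [ dada for dada in splitted if dada.startswith(("9","8")) and dada not in mails ]
--     mobils =[ dada for dada in splitted if dada not in mails+fixes ]
--
--     dades_tutor = { "mails": mails,
--                    "fixes": fixes,
--                    "mobils": mobils,
--                  }
--     return dades_tutor
-- ===== SOURCE B (Python) =====
-- def dades_responsable(dades):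
--     mails, fixes, mobils = [], [], []
--     for dada in dades.split(" - "):
--         if "@" in dada:
--             mails.append(dada)
--         elif dada.startswith(("9", "8")):
--             fixes.append(dada)
--         else:
--             mobils.append(dada)
--     return {"mails": mails, "fixes": fixes, "mobils": mobils}
-- ===== Notes on version B (the rewrite author's own statement) =====
-- stated objective: simpler
-- what changed: Replaces three comprehensions with quadratic list-membership scans by a single linear pass whose mutually exclusive branches (the at-sign test first, then the 9/8 prefix test) append each part to exactly one bucket.
import Mathlib
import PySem

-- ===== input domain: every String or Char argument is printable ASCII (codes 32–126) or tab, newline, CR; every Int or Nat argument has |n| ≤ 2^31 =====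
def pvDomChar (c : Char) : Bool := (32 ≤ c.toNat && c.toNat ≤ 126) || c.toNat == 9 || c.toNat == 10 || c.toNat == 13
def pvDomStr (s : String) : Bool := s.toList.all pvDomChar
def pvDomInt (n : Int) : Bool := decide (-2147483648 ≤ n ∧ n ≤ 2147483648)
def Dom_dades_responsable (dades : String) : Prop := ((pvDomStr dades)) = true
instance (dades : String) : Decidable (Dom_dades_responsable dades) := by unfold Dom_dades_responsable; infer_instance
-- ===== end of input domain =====

-- B replaces A's three membership-gated comprehensions by one linear pass with mutually exclusive branches (simpler decomposition).


-- ===== PORT A =====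
-- dades.split(" - "): the separator is the non-empty literal " - ", so Python never raises; .getD [] is unreachable
def dades_responsable (dades : String) : List (String × List String) :=
  let splitted := (PySem.Str.split? dades " - ").getD []
  let mails := splitted.filter (fun dada => PySem.Str.isIn "@" dada)
  let fixes := splitted.filter (fun dada =>
    (PySem.Str.startswith dada "9" || PySem.Str.startswith dada "8") && !(mails.contains dada))
  let mobils := splitted.filter (fun dada => !((mails ++ fixes).contains dada))
  [("mails", mails), ("fixes", fixes), ("mobils", mobils)]

-- ===== PORT B =====
-- B's two branch tests, named ('"@" in dada' and 'dada.startswith(("9","8"))')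
def pvM (d : String) : Bool := PySem.Str.isIn "@" d
def pvS (d : String) : Bool := PySem.Str.startswith d "9" || PySem.Str.startswith d "8"

-- the body of B's single loop: append the part to exactly one of the three buckets
def pvStep (acc : List String × List String × List String) (dada : String) :
    List String × List String × List String :=
  if pvM dada then (acc.1 ++ [dada], acc.2.1, acc.2.2)
  else if pvS dada then (acc.1, acc.2.1 ++ [dada], acc.2.2)
  else (acc.1, acc.2.1, acc.2.2 ++ [dada])

def dades_responsable_alt (dades : String) : List (String × List String) :=
  let r := ((PySem.Str.split? dades " - ").getD []).foldl pvStep ([], [], [])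
  [("mails", r.1), ("fixes", r.2.1), ("mobils", r.2.2)]

-- ===== PRECONDITION & SPEC =====
def Spec_dades_responsable (dades : String) (out : List (String × List String)) : Prop := out = dades_responsable_alt dades
instance (dades : String) (out : List (String × List String)) : Decidable (Spec_dades_responsable dades out) := by unfold Spec_dades_responsable; infer_instance

-- ===== CLAIM (what is proved, stated in full; the proofs are below) =====
def Claim_equal_dades_responsable : Prop := ∀ (dades : String), Dom_dades_responsable dades → Spec_dades_responsable dades (dades_responsable dades)

-- ===== LEMMAS AND PROOFS =====

-- B's fold produces the three mutually-exclusive filters, appended to the accumulators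
theorem pvFold_eq (l : List String) (m f mo : List String) :
    l.foldl pvStep (m, f, mo) =
      (m ++ l.filter pvM,
       f ++ l.filter (fun d => !pvM d && pvS d),
       mo ++ l.filter (fun d => !pvM d && !pvS d)) := by
  induction l generalizing m f mo with
  | nil => simp
  | cons d t ih =>
    simp only [List.foldl_cons, List.filter_cons]
    cases hM : pvM d
    · cases hS : pvS d
      · simp [pvStep, hM, hS, ih]
      · simp [pvStep, hM, hS, ih]
    · simp [pvStep, hM, ih]

-- membership in a filtered sublist of l reduces to the predicate, for d ∈ l
theorem pvContains_filter (l : List String) (p : String → Bool) (d : String) (hd : d ∈ l) :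
    (l.filter p).contains d = p d := by
  by_cases h : p d = true
  · simp [List.mem_filter, hd, h]
  · simp only [Bool.not_eq_true] at h
    simp [List.mem_filter, h]

-- A's "fixes" filter equals B's second branch filter
theorem pvFixes_eq (l : List String) :
    l.filter (fun d => pvS d && !((l.filter pvM).contains d)) =
      l.filter (fun d => !pvM d && pvS d) := by
  apply List.filter_congr
  intro d hd
  rw [pvContains_filter l pvM d hd]
  cases pvM d <;> cases pvS d <;> simp

-- A's "mobils" filter equals B's third branch filter
theorem pvMobils_eq (l : List String) :
    l.filter (fun d =>
        !((l.filter pvM ++ l.filter (fun e => pvS e && !((l.filter pvM).contains e))).contains d)) =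
      l.filter (fun d => !pvM d && !pvS d) := by
  apply List.filter_congr
  intro d hd
  rw [pvFixes_eq l]
  have h1 := pvContains_filter l pvM d hd
  have h2 := pvContains_filter l (fun e => !pvM e && pvS e) d hd
  simp only [List.contains_append]
  rw [h1, h2]
  cases hM : pvM d <;> cases hS : pvS d <;> simp [hM, hS]

-- ===== VERDICT (by name: the statement is the Claim_ definition above) =====
theorem dades_responsable_spec : Claim_equal_dades_responsable := by
  intro dades _
  show dades_responsable dades = dades_responsable_alt dades
  have key : ∀ l : List String,
      ([("mails", l.filter pvM),
        ("fixes", l.filter (fun d => pvS d && !((l.filter pvM).contains d))),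
        ("mobils", l.filter (fun d =>
          !((l.filter pvM ++ l.filter (fun e => pvS e && !((l.filter pvM).contains e))).contains d)))]
        : List (String × List String)) =
      [("mails", l.filter pvM),
       ("fixes", l.filter (fun d => !pvM d && pvS d)),
       ("mobils", l.filter (fun d => !pvM d && !pvS d))] := by
    intro l
    rw [pvMobils_eq, pvFixes_eq]
  have hB : dades_responsable_alt dades =
      [("mails", ((PySem.Str.split? dades " - ").getD []).filter pvM),
       ("fixes", ((PySem.Str.split? dades " - ").getD []).filter (fun d => !pvM d && pvS d)),
       ("mobils", ((PySem.Str.split? dades " - ").getD []).filter (fun d => !pvM d && !pvS d))] := by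
    simp only [dades_responsable_alt]
    rw [pvFold_eq]
    simp
  rw [hB]
  exact key ((PySem.Str.split? dades " - ").getD [])
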